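-- pv_equiv track=rewrite | github.com/mglynnhenley/asynchronousSingingMicrobits | tools/generate-music.py | compress_segments
-- ===== SOURCE A (Python) =====
-- import collections
--
-- def compress_segments(segments):
--     '''
--     Given an iterable of event segments, return a list of events and indices
--     into the events to reduce the overall size.
--
--     Returns: (events, segments)
--         events: list of (period, duration) pairs
--         segments: list of (start_index, length) pairs
--     '''
--     # deduplicate the segments
--     output_segments = []
--     d = collections.defaultdict(list)
--     for i, segment in enumerate(segments):
--         output_segments.append(None)
--         segment = list(segment)
--         d[tuple(segment)].append(i)
--
--     # get the segments in order of the first usage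
--     output_events = []
--     by_first_index = lambda item: item[1][0]
--     for segment, indices in sorted(d.items(), key=by_first_index):
--         start_index = len(output_events)
--         length = len(segment)
--
--         output_events.extend(segment)
--         for i in indices:
--             output_segments[i] = (start_index, length)
--
--     assert all(s is not None for s in output_segments)
--
--     return output_events, output_segments
-- ===== SOURCE B (Python) =====
-- def compress_segments(segments):
--     '''Single pass: events grow when a new segment is first seen; a dict maps each
--     distinct segment to its (start_index, length), appended for every usage.'''
--     output_events = []
--     output_segments = []
--     seen = {}
--     for segment in segments:
--         key = tuple(list(segment))
--         if key in seen:
--             output_segments.append(seen[key])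
--         else:
--             ref = (len(output_events), len(key))
--             seen[key] = ref
--             output_events.extend(key)
--             output_segments.append(ref)
--     return output_events, output_segments
-- ===== Notes on version B (the rewrite author's own statement) =====
-- stated objective: simpler
-- what changed: Replaced A's two-pass scheme (placeholder list + defaultdict of index groups + sort by first usage + back-filling pass) by a single forward pass that extends the event list on first sight of a segment and records (start,length) in a dict, appending the reference for every usage; the sort and the second pass disappear.
import Mathlib
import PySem

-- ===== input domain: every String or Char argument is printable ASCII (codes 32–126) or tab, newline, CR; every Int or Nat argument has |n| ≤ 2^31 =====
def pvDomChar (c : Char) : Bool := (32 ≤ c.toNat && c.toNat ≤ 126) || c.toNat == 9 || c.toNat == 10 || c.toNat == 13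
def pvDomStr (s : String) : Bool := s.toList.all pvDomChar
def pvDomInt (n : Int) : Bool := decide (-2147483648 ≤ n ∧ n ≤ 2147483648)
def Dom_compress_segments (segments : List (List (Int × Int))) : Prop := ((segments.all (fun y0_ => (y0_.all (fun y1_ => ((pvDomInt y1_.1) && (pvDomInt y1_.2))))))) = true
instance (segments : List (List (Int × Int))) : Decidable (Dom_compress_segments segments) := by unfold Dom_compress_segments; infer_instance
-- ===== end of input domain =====

-- B replaces A's placeholder list + defaultdict-of-index-groups + sort by first usage + back-filling
-- pass by one forward pass with a seen-dict; the return values are proved equal on all inputs.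

-- ===== PORT A =====
-- output_segments[i] = v : exact here because every index stored in d comes from enumerate (0 ≤ i < len)
def pyStore {α : Type} (os : List α) (i : Int) (v : α) : List α := os.set i.toNat v

def compress_segments (segments : List (List (Int × Int))) : (List (Int × Int)) × (List (Int × Int)) :=
  -- for i, segment in enumerate(segments): output_segments.append(None); d[tuple(segment)].append(i)
  let st1 := (PySem.List.enumerate segments 0).foldl
      (fun (st : List (Option (Int × Int)) × PySem.Dict (List (Int × Int)) (List Int)) p =>
        (st.1 ++ [none], st.2.modify p.2 [] (fun l => l ++ [p.1])))
      ([], PySem.Dict.empty)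
  -- for segment, indices in sorted(d.items(), key=lambda item: item[1][0]): …
  -- (item[1][0] ported as pyGetD _ 0 0: exact, every indices list the first loop builds is nonempty)
  let st2 := (PySem.List.sorted st1.2.items (fun item => PySem.List.pyGetD item.2 0 0) false).foldl
      (fun (st : List (Int × Int) × List (Option (Int × Int))) p =>
        let start_index : Int := st.1.length
        let length : Int := p.1.length
        (st.1 ++ p.1, p.2.foldl (fun os i => pyStore os i (some (start_index, length))) st.2))
      ([], st1.1)
  -- assert all(s is not None …): every slot was filled, so getD (0,0) is exact
  (st2.1, st2.2.map (fun o => o.getD (0, 0)))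

-- ===== PORT B =====
def compress_segments_alt (segments : List (List (Int × Int))) : (List (Int × Int)) × (List (Int × Int)) :=
  let st := segments.foldl
      (fun (st : List (Int × Int) × List (Int × Int) × PySem.Dict (List (Int × Int)) (Int × Int)) seg =>
        if st.2.2.contains seg then
          (st.1, st.2.1 ++ [st.2.2.getD seg (0, 0)], st.2.2)
        else
          let ref : Int × Int := ((st.1.length : Int), (seg.length : Int))
          (st.1 ++ seg, st.2.1 ++ [ref], st.2.2.insert seg ref))
      ([], [], PySem.Dict.empty)
  (st.1, st.2.1)

-- ===== PRECONDITION & SPEC =====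
def Spec_compress_segments (segments : List (List (Int × Int))) (out : (List (Int × Int)) × (List (Int × Int))) : Prop := out = compress_segments_alt segments
instance (segments : List (List (Int × Int))) (out : (List (Int × Int)) × (List (Int × Int))) : Decidable (Spec_compress_segments segments out) := by unfold Spec_compress_segments; infer_instance

-- ===== CLAIM (what is proved, stated in full; the proofs are below) =====
def Claim_equal_compress_segments : Prop := ∀ (segments : List (List (Int × Int))), Dom_compress_segments segments → Spec_compress_segments segments (compress_segments segments)

-- ===== LEMMAS AND PROOFS =====

-- the common value both programs record for a segment s:
-- (number of events emitted before s's first occurrence, length of s)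
def vOf (p : List (List (Int × Int))) (s : List (Int × Int)) : Int × Int :=
  ((((PySem.List.dedup p).takeWhile (fun t => !(t == s))).flatten.length : Int), (s.length : Int))

theorem tw_append_of_mem {α : Type} [BEq α] [LawfulBEq α] {l : List α} (t : List α) {s : α} (h : s ∈ l) :
    (l ++ t).takeWhile (fun x => !(x == s)) = l.takeWhile (fun x => !(x == s)) := by
  induction l with
  | nil => cases h
  | cons a l ih =>
    rcases eq_or_ne a s with rfl | ha
    · simp
    · have hsl : s ∈ l := by
        rcases List.mem_cons.mp h with rfl | hm
        · exact absurd rfl ha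
        · exact hm
      simp [ha, ih hsl]

theorem tw_append_self {α : Type} [BEq α] [LawfulBEq α] {l : List α} {s : α} (h : s ∉ l) :
    (l ++ [s]).takeWhile (fun x => !(x == s)) = l := by
  induction l with
  | nil => simp
  | cons a l ih =>
    have ha : ¬ a = s := fun e => h (by simp [e])
    simp [ha, ih (fun hm => h (List.mem_cons_of_mem _ hm))]

theorem vOf_append (p t : List (List (Int × Int))) (s : List (Int × Int)) (h : s ∈ p) :
    vOf (p ++ t) s = vOf p s := by
  unfold vOf
  have hd : s ∈ PySem.List.dedup p := by simp [h]
  have he : PySem.List.dedup (p ++ t) = PySem.List.dedup p ++ ((PySem.Set.ofList t).filter (fun y => !(PySem.Set.contains (PySem.List.dedup p) y))) := by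
    simp [PySem.List.dedup_eq_ofList, PySem.Set.ofList_append, PySem.Set.update_eq_append_filter]
  rw [he, tw_append_of_mem _ hd]

theorem dedup_append_singleton_of_mem {p : List (List (Int × Int))} {s : List (Int × Int)} (h : s ∈ p) :
    PySem.List.dedup (p ++ [s]) = PySem.List.dedup p := by
  simp only [PySem.List.dedup_eq_ofList, PySem.Set.ofList_append_singleton]
  rw [PySem.Set.add_eq_ite]
  simp [PySem.Set.mem_ofList, h]

theorem dedup_append_singleton_of_not_mem {p : List (List (Int × Int))} {s : List (Int × Int)} (h : s ∉ p) :
    PySem.List.dedup (p ++ [s]) = PySem.List.dedup p ++ [s] := by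
  simp only [PySem.List.dedup_eq_ofList, PySem.Set.ofList_append_singleton]
  rw [PySem.Set.add_eq_ite]
  simp [PySem.Set.mem_ofList, h]

theorem vOf_append_singleton_self {p : List (List (Int × Int))} {s : List (Int × Int)} (h : s ∉ p) :
    vOf (p ++ [s]) s = (((PySem.List.dedup p).flatten.length : Int), (s.length : Int)) := by
  unfold vOf
  have hs : s ∉ PySem.List.dedup p := by simp [h]
  rw [dedup_append_singleton_of_not_mem h, tw_append_self hs]

-- B's loop body, named for the proofs (definitionally the fold body of compress_segments_alt)
def stepB (st : List (Int × Int) × List (Int × Int) × PySem.Dict (List (Int × Int)) (Int × Int))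
    (seg : List (Int × Int)) :
    List (Int × Int) × List (Int × Int) × PySem.Dict (List (Int × Int)) (Int × Int) :=
  if st.2.2.contains seg then
    (st.1, st.2.1 ++ [st.2.2.getD seg (0, 0)], st.2.2)
  else
    let ref : Int × Int := ((st.1.length : Int), (seg.length : Int))
    (st.1 ++ seg, st.2.1 ++ [ref], st.2.2.insert seg ref)

theorem B_inv (xs : List (List (Int × Int))) :
    ∀ (p : List (List (Int × Int))) (out : List (Int × Int))
      (seen : PySem.Dict (List (Int × Int)) (Int × Int)),
    (∀ k, seen.contains k = decide (k ∈ p)) →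
    (∀ k ∈ p, seen.getD k (0,0) = vOf p k) →
    (xs.foldl stepB ((PySem.List.dedup p).flatten, out, seen)).1 = (PySem.List.dedup (p ++ xs)).flatten
    ∧ (xs.foldl stepB ((PySem.List.dedup p).flatten, out, seen)).2.1
        = out ++ xs.map (fun s => vOf (p ++ xs) s) := by
  induction xs with
  | nil => intro p out seen h1 h2; simp
  | cons s rest ih =>
    intro p out seen h1 h2
    have hassoc : p ++ s :: rest = (p ++ [s]) ++ rest := by simp
    by_cases hm : s ∈ p
    · have hc : stepB ((PySem.List.dedup p).flatten, out, seen) s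
          = ((PySem.List.dedup p).flatten, out ++ [seen.getD s (0,0)], seen) := by
        simp [stepB, h1 s, hm]
      have hded : PySem.List.dedup (p ++ [s]) = PySem.List.dedup p := dedup_append_singleton_of_mem hm
      have h1' : ∀ k, seen.contains k = decide (k ∈ p ++ [s]) := by
        intro k; rw [h1 k]
        by_cases hk : k = s <;> simp [hk, hm]
      have h2' : ∀ k ∈ p ++ [s], seen.getD k (0,0) = vOf (p ++ [s]) k := by
        intro k hk
        have hkp : k ∈ p := by
          rcases List.mem_append.mp hk with h | h
          · exact h
          · simp at h; subst h; exact hm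
        rw [vOf_append p [s] k hkp]; exact h2 k hkp
      have := ih (p ++ [s]) (out ++ [seen.getD s (0,0)]) seen h1' h2'
      rw [List.foldl_cons, hc, ← hded]
      rw [hassoc]
      refine ⟨this.1, ?_⟩
      rw [this.2, h2 s hm]
      have hv : vOf (p ++ s :: rest) s = vOf p s := vOf_append p (s :: rest) s hm
      simp [hv]
    · have hc : stepB ((PySem.List.dedup p).flatten, out, seen) s
          = ((PySem.List.dedup p).flatten ++ s,
             out ++ [(((PySem.List.dedup p).flatten.length : Int), (s.length : Int))],
             seen.insert s (((PySem.List.dedup p).flatten.length : Int), (s.length : Int))) := by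
        simp [stepB, h1 s, hm]
      have hded : PySem.List.dedup (p ++ [s]) = PySem.List.dedup p ++ [s] :=
        dedup_append_singleton_of_not_mem hm
      have hflat : (PySem.List.dedup (p ++ [s])).flatten = (PySem.List.dedup p).flatten ++ s := by
        rw [hded]; simp
      have h1' : ∀ k, (seen.insert s (((PySem.List.dedup p).flatten.length : Int), (s.length : Int))).contains k = decide (k ∈ p ++ [s]) := by
        intro k
        rw [PySem.Dict.contains_insert]
        by_cases hk : k = s <;> simp [hk, h1 k]
      have h2' : ∀ k ∈ p ++ [s], (seen.insert s (((PySem.List.dedup p).flatten.length : Int), (s.length : Int))).getD k (0,0) = vOf (p ++ [s]) k := by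
        intro k hk
        rw [PySem.Dict.getD_insert]
        by_cases hks : k = s
        · subst hks; simp [vOf_append_singleton_self hm]
        · have hkp : k ∈ p := by
            rcases List.mem_append.mp hk with h | h
            · exact h
            · simp at h; exact absurd h hks
          simp [hks, vOf_append p [s] k hkp, h2 k hkp]
      have := ih (p ++ [s]) (out ++ [(((PySem.List.dedup p).flatten.length : Int), (s.length : Int))])
        (seen.insert s (((PySem.List.dedup p).flatten.length : Int), (s.length : Int))) h1' h2'
      rw [List.foldl_cons, hc, ← hflat, hassoc]
      refine ⟨this.1, ?_⟩
      rw [this.2]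
      have hv : vOf (p ++ s :: rest) s = (((PySem.List.dedup p).flatten.length : Int), (s.length : Int)) := by
        rw [hassoc, vOf_append (p ++ [s]) rest s (by simp), vOf_append_singleton_self hm]
      simp [hv]

theorem alt_eq (segments : List (List (Int × Int))) :
    compress_segments_alt segments
      = ((PySem.List.dedup segments).flatten, segments.map (fun s => vOf segments s)) := by
  have h := B_inv segments [] [] PySem.Dict.empty
    (fun k => by simp [PySem.Dict.contains_empty])
    (fun k hk => absurd hk (List.not_mem_nil))
  simp only [PySem.List.dedup_eq_ofList, PySem.Set.ofList_nil, List.flatten_nil,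
    List.nil_append] at h
  unfold compress_segments_alt
  have hfold : segments.foldl
      (fun (st : List (Int × Int) × List (Int × Int) × PySem.Dict (List (Int × Int)) (Int × Int)) seg =>
        if st.2.2.contains seg then
          (st.1, st.2.1 ++ [st.2.2.getD seg (0, 0)], st.2.2)
        else
          let ref : Int × Int := ((st.1.length : Int), (seg.length : Int))
          (st.1 ++ seg, st.2.1 ++ [ref], st.2.2.insert seg ref))
      ([], [], PySem.Dict.empty) = segments.foldl stepB ([], [], PySem.Dict.empty) := rfl
  rw [hfold]
  exact Prod.ext h.1 h.2

-- ===== A-side lemmas =====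

def offIn (ks : List (List (Int × Int))) (s : List (Int × Int)) : Int :=
  ((ks.takeWhile (fun t => !(t == s))).flatten.length : Int)

def idxs (segments : List (List (Int × Int))) (k : List (Int × Int)) : List Int :=
  ((PySem.List.enumerate segments 0).filter (fun p => p.2 == k)).map (fun p => p.1)

def setAll {α : Type} (os : List α) (is : List Int) (v : α) : List α :=
  is.foldl (fun os i => pyStore os i v) os

def stepA (st : List (Int × Int) × List (Option (Int × Int)))
    (p : (List (Int × Int)) × List Int) : List (Int × Int) × List (Option (Int × Int)) :=
  (st.1 ++ p.1, setAll st.2 p.2 (some ((st.1.length : Int), (p.1.length : Int))))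

theorem mem_idxs {segments : List (List (Int × Int))} {k : List (Int × Int)} {i : Int} :
    i ∈ idxs segments k ↔ ∃ (j : Nat) (hj : j < segments.length), segments[j] = k ∧ i = (j : Int) := by
  unfold idxs
  simp only [List.mem_map, List.mem_filter, PySem.List.mem_enumerate_iff]
  constructor
  · rintro ⟨p, ⟨⟨j, hj, rfl⟩, hk⟩, rfl⟩
    exact ⟨j, hj, by simpa using hk, by simp⟩
  · rintro ⟨j, hj, hk, rfl⟩
    exact ⟨((j : Int), segments[j]), ⟨⟨j, hj, by simp⟩, by simpa using hk⟩, rfl⟩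

theorem idxs_nonneg {segments : List (List (Int × Int))} {k : List (Int × Int)} :
    ∀ i ∈ idxs segments k, 0 ≤ i := by
  intro i hi
  rcases mem_idxs.mp hi with ⟨j, hj, _, rfl⟩
  positivity

theorem fIdx (xs : List (List (Int × Int))) (k : List (Int × Int)) :
    ∀ (s : Int), k ∈ xs →
    PySem.List.pyGetD (((PySem.List.enumerate xs s).filter (fun p => p.2 == k)).map (fun p => p.1)) 0 0
      = s + (xs.idxOf k : Int) := by
  induction xs with
  | nil => intro s h; cases h
  | cons x t ih =>
    intro s h
    rw [PySem.List.enumerate_cons]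
    by_cases hx : x = k
    · subst hx
      simp only [List.filter_cons]
      have : ((s, x).2 == x) = true := by simp
      simp only [this, if_true, List.map_cons]
      rw [PySem.List.pyGetD_eq_getElem _ _ (le_refl 0) (by simp)]
      simp [List.idxOf_cons_self]
    · have hkt : k ∈ t := by
        rcases List.mem_cons.mp h with rfl | hm
        · exact absurd rfl hx
        · exact hm
      simp only [List.filter_cons]
      have : ((s, x).2 == k) = false := by simpa using hx
      simp only [this, Bool.false_eq_true, if_false]
      rw [ih (s + 1) hkt, List.idxOf_cons_ne _ (by simpa using hx)]
      push_cast
      ring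

theorem discard_eq_filter {α : Type} [BEq α] (s : List α) (x : α) :
    PySem.Set.discard s x = s.filter (fun y => !(y == x)) := by
  simp [PySem.Set.discard]

theorem dedup_pairwise_idxOf (xs : List (List (Int × Int))) :
    (PySem.List.dedup xs).Pairwise (fun a b => xs.idxOf a < xs.idxOf b) := by
  induction xs with
  | nil => simp [PySem.List.dedup_eq_ofList, PySem.Set.ofList_nil]
  | cons x t ih =>
    rw [PySem.List.dedup_eq_ofList, PySem.Set.ofList_cons]
    refine List.Pairwise.cons ?_ ?_
    · intro b hb
      have hbx : b ≠ x := by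
        rcases (PySem.Set.mem_discard _ _ _).mp hb with ⟨_, hne⟩
        exact hne
      rw [List.idxOf_cons_self, List.idxOf_cons_ne _ (fun e => hbx e.symm)]
      omega
    · rw [discard_eq_filter]
      have hsub : ((PySem.Set.ofList t).filter (fun y => !(y == x))).Sublist (PySem.Set.ofList t) :=
        List.filter_sublist ..
      have hpw := (ih.sublist hsub :
        ((PySem.Set.ofList t).filter (fun y => !(y == x))).Pairwise (fun a b => t.idxOf a < t.idxOf b))
      refine hpw.imp_of_mem ?_
      intro a b ha hb hr
      have hax : ¬ a = x := by simpa using (List.of_mem_filter ha)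
      have hbx : ¬ b = x := by simpa using (List.of_mem_filter hb)
      rw [List.idxOf_cons_ne _ (fun e => hax e.symm), List.idxOf_cons_ne _ (fun e => hbx e.symm)]
      omega

theorem setAll_length {α : Type} (is : List Int) : ∀ (os : List α) (v : α),
    (setAll os is v).length = os.length := by
  induction is with
  | nil => intro os v; rfl
  | cons i is ih =>
    intro os v
    show (setAll (pyStore os i v) is v).length = _
    rw [ih]
    simp [pyStore]

theorem setAll_getElem? {α : Type} (is : List Int) : ∀ (os : List α) (v : α),
    (∀ i ∈ is, 0 ≤ i) → ∀ (j : Nat),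
    (setAll os is v)[j]? = if (j : Int) ∈ is ∧ j < os.length then some v else os[j]? := by
  induction is with
  | nil => intro os v _ j; simp [setAll]
  | cons i is ih =>
    intro os v hnn j
    have h0i : 0 ≤ i := hnn i (by simp)
    have hstep : setAll os (i :: is) v = setAll (pyStore os i v) is v := rfl
    rw [hstep, ih _ v (fun i hi => hnn i (by simp [hi])) j]
    have hlen : (pyStore os i v).length = os.length := by simp [pyStore]
    by_cases hin : (j : Int) ∈ is
    · by_cases hj : j < os.length
      · simp [hin, hj, hlen]
      · have : (pyStore os i v)[j]? = os[j]? := by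
          rw [pyStore, List.getElem?_set]
          split_ifs with h1 h2 <;> simp_all <;> omega
        simp [hin, hj, hlen, this]
    · by_cases hji : (j : Int) = i
      · have hij : i.toNat = j := by omega
        by_cases hj : j < os.length
        · have : (pyStore os i v)[j]? = some v := by
            rw [pyStore, List.getElem?_set]
            simp [hij, hj]
          rw [if_neg (by simp [hin]), this, if_pos (by simp [← hji, hj])]
        · have : (pyStore os i v)[j]? = os[j]? := by
            rw [pyStore, List.getElem?_set]
            split_ifs with h1 h2 <;> simp_all <;> omega
          simp [hin, hji, hj, hlen, this]
      · have : (pyStore os i v)[j]? = os[j]? := by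
          rw [pyStore, List.getElem?_set]
          have : ¬ i.toNat = j := by omega
          simp [this]
        simp [hin, hji, hlen, this]

theorem offIn_cons_ne {k s : List (Int × Int)} (ks : List (List (Int × Int))) (h : ¬ k = s) :
    offIn (k :: ks) s = (k.length : Int) + offIn ks s := by
  unfold offIn
  have : (k == s) = false := by simpa using h
  simp [this]

theorem offIn_cons_self (k : List (Int × Int)) (ks : List (List (Int × Int))) :
    offIn (k :: ks) k = 0 := by
  unfold offIn
  simp

theorem A_loop (segments : List (List (Int × Int))) (ks : List (List (Int × Int))) :
    ks.Nodup → ∀ (ev : List (Int × Int)) (os : List (Option (Int × Int))),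
    os.length = segments.length →
    (ks.foldl (fun st k => stepA st (k, idxs segments k)) (ev, os)).1 = ev ++ ks.flatten
    ∧ (ks.foldl (fun st k => stepA st (k, idxs segments k)) (ev, os)).2.length = segments.length
    ∧ ∀ (j : Nat) (hj : j < segments.length),
      (ks.foldl (fun st k => stepA st (k, idxs segments k)) (ev, os)).2[j]?
        = if segments[j] ∈ ks
          then some (some ((ev.length : Int) + offIn ks segments[j], ((segments[j]).length : Int)))
          else os[j]? := by
  induction ks with
  | nil =>
    intro _ ev os hlen
    refine ⟨by simp, by simpa using hlen, ?_⟩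
    intro j hj
    simp
  | cons k ks ih =>
    intro hnd ev os hlen
    have hknm : k ∉ ks := (List.nodup_cons.mp hnd).1
    have hnd' : ks.Nodup := (List.nodup_cons.mp hnd).2
    have hstep : (k :: ks).foldl (fun st k => stepA st (k, idxs segments k)) (ev, os)
        = ks.foldl (fun st k => stepA st (k, idxs segments k))
            (ev ++ k, setAll os (idxs segments k) (some ((ev.length : Int), (k.length : Int)))) := rfl
    have hlen' : (setAll os (idxs segments k) (some ((ev.length : Int), (k.length : Int)))).length = segments.length := by
      rw [setAll_length, hlen]
    obtain ⟨h1, h2, h3⟩ := ih hnd' (ev ++ k) _ hlen'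
    rw [hstep]
    refine ⟨by rw [h1]; simp, by rw [h2], ?_⟩
    intro j hj
    rw [h3 j hj]
    have hos' := setAll_getElem? (idxs segments k) os
      (some ((ev.length : Int), (k.length : Int))) idxs_nonneg j
    have hevk : ((ev ++ k).length : Int) = (ev.length : Int) + (k.length : Int) := by
      simp
    by_cases hmem : segments[j] ∈ ks
    · have hne : ¬ k = segments[j] := fun e => hknm (e ▸ hmem)
      rw [if_pos hmem, if_pos (by simp [hmem])]
      have hoff : ((ev ++ k).length : Int) + offIn ks segments[j]
          = (ev.length : Int) + offIn (k :: ks) segments[j] := by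
        rw [offIn_cons_ne ks hne, hevk]; ring
      rw [hoff]
    · rw [if_neg hmem]
      by_cases heq : segments[j] = k
      · have hjin : (j : Int) ∈ idxs segments k := mem_idxs.mpr ⟨j, hj, heq, rfl⟩
        rw [hos', if_pos ⟨hjin, by omega⟩, if_pos (by simp [heq])]
        rw [heq, offIn_cons_self]
        simp
      · have hjnin : (j : Int) ∉ idxs segments k := by
          intro hc
          rcases mem_idxs.mp hc with ⟨j', hj', hk', hjj⟩
          have hjj' : j' = j := by omega
          subst hjj'
          exact heq hk'
        rw [hos', if_neg (by simp [hjnin]), if_neg (by simp [heq, hmem])]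

-- characterisation of the defaultdict built by A's first loop
theorem d_keys (segments : List (List (Int × Int))) :
    ((PySem.List.enumerate segments 0).foldl
      (fun (d : PySem.Dict (List (Int × Int)) (List Int)) p => d.modify p.2 [] (fun l => l ++ [p.1]))
      PySem.Dict.empty).keys = PySem.List.dedup segments := by
  rw [PySem.Dict.keys_foldl_modify_key]
  simp [PySem.List.map_snd_enumerate, PySem.Set.update_nil_left]

theorem d_keys_nodup (segments : List (List (Int × Int))) :
    ((PySem.List.enumerate segments 0).foldl
      (fun (d : PySem.Dict (List (Int × Int)) (List Int)) p => d.modify p.2 [] (fun l => l ++ [p.1]))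
      PySem.Dict.empty).keys.Nodup := by
  apply PySem.Dict.nodup_keys_foldl_modify_key
  simp

theorem d_getD (segments : List (List (Int × Int))) (k : List (Int × Int)) :
    ((PySem.List.enumerate segments 0).foldl
      (fun (d : PySem.Dict (List (Int × Int)) (List Int)) p => d.modify p.2 [] (fun l => l ++ [p.1]))
      PySem.Dict.empty).getD k [] = idxs segments k := by
  have h0 : (PySem.List.enumerate segments 0).foldl
      (fun (d : PySem.Dict (List (Int × Int)) (List Int)) p => d.modify p.2 [] (fun l => l ++ [p.1]))
      PySem.Dict.empty
      = ((PySem.List.enumerate segments 0).map Prod.swap).foldl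
      (fun (d : PySem.Dict (List (Int × Int)) (List Int)) p => d.modify p.1 [] (fun l => l ++ [p.2]))
      PySem.Dict.empty := by rw [List.foldl_map]; rfl
  rw [h0, PySem.Dict.getD_foldl_modify_append]
  simp [idxs, List.filter_map, List.map_map, Function.comp_def]

theorem d_items (segments : List (List (Int × Int))) :
    ((PySem.List.enumerate segments 0).foldl
      (fun (d : PySem.Dict (List (Int × Int)) (List Int)) p => d.modify p.2 [] (fun l => l ++ [p.1]))
      PySem.Dict.empty).items
    = (PySem.List.dedup segments).map (fun k => (k, idxs segments k)) := by
  rw [PySem.Dict.items_eq_map_keys _ (d_keys_nodup segments) [], d_keys]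
  refine List.map_congr_left ?_
  intro k _
  rw [d_getD]

theorem A_eq (segments : List (List (Int × Int))) :
    compress_segments segments
      = ((PySem.List.dedup segments).flatten, segments.map (fun s => vOf segments s)) := by
  unfold compress_segments
  rw [PySem.List.foldl_prod_mk
    (f := fun (acc : List (Option (Int × Int))) (_ : Int × List (Int × Int)) => acc ++ [none])
    (g := fun (d : PySem.Dict (List (Int × Int)) (List Int)) (p : Int × List (Int × Int)) =>
      d.modify p.2 [] (fun l => l ++ [p.1]))]
  rw [PySem.List.foldl_append_singleton_eq_map]
  simp only []
  rw [d_items segments]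
  -- the sort is the identity: the items are already in strictly increasing order of first index
  have hsorted : PySem.List.sorted
      ((PySem.List.dedup segments).map (fun k => (k, idxs segments k)))
      (fun item => PySem.List.pyGetD item.2 0 0) false
      = (PySem.List.dedup segments).map (fun k => (k, idxs segments k)) := by
    refine PySem.List.sorted_eq_of_perm_of_pairwise_lt _ _ _ (List.Perm.refl _) ?_
    rw [List.pairwise_map]
    refine (dedup_pairwise_idxOf segments).imp_of_mem ?_
    intro a b ha hb hr
    have hma : a ∈ segments := by simpa using ha
    have hmb : b ∈ segments := by simpa using hb
    have hfa := fIdx segments a 0 hma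
    have hfb := fIdx segments b 0 hmb
    simp only [idxs]
    rw [hfa, hfb]
    omega
  rw [hsorted]
  have hmapfold : ((PySem.List.dedup segments).map (fun k => (k, idxs segments k))).foldl
      (fun (st : List (Int × Int) × List (Option (Int × Int))) p =>
        (st.1 ++ p.1, p.2.foldl (fun os i => pyStore os i (some ((st.1.length : Int), (p.1.length : Int)))) st.2))
      ([], [] ++ (PySem.List.enumerate segments 0).map (fun _ => none))
      = (PySem.List.dedup segments).foldl (fun st k => stepA st (k, idxs segments k))
      ([], [] ++ (PySem.List.enumerate segments 0).map (fun _ => none)) := by rw [List.foldl_map]; rfl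
  rw [hmapfold]
  have hosl : ([] ++ (PySem.List.enumerate segments 0).map (fun (_ : Int × List (Int × Int)) => (none : Option (Int × Int)))).length = segments.length := by
    simp [PySem.List.length_enumerate]
  have hnd : (PySem.List.dedup segments).Nodup := by
    rw [PySem.List.dedup_eq_ofList]; exact PySem.Set.nodup_ofList _
  obtain ⟨h1, h2, h3⟩ := A_loop segments (PySem.List.dedup segments) hnd [] _ hosl
  refine Prod.ext (by simpa using h1) ?_
  -- second component: pointwise over positions
  apply List.ext_getElem?
  intro j
  by_cases hj : j < segments.length
  · rw [List.getElem?_map, h3 j hj]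
    have hmem : segments[j] ∈ PySem.List.dedup segments := by
      simp
    rw [if_pos hmem]
    have : (segments.map (fun s => vOf segments s))[j]? = some (vOf segments segments[j]) := by
      simp [hj]
    rw [this]
    simp [vOf, offIn]
  · rw [List.getElem?_eq_none (by rw [List.length_map, h2]; omega),
        List.getElem?_eq_none (by rw [List.length_map]; omega)]

-- ===== VERDICT (by name: the statement is the Claim_ definition above) =====
theorem compress_segments_spec : Claim_equal_compress_segments := by
  intro segments _
  unfold Spec_compress_segments
  rw [A_eq, alt_eq]
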